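-- pv_equiv track=rewrite | github.com/malikinss/PyGen | PyGen for Professionals/6_additional_collection_types/6_5_defaultdict/6_5_3_print_department_workers/6_5_3_print_department_workers.py | group_and_sort_workers_by_department
-- ===== SOURCE A (Python) =====
-- from collections import defaultdict
-- from typing import Dict, List, Tuple
--
-- def group_and_sort_workers_by_department(
--     data: List[Tuple[str, str]]
-- ) -> Dict[str, List[str]]:
--     """
--     Groups workers by their departments and sorts both the departments
--     and the workers lexicographically.
--
--     Args:
--         data (List[Tuple[str, str]]): The list of tuples containing department
--         and worker names.
--
--     Returns:
--         Dict[str, List[str]]: A sorted dictionary with sorted lists of workers.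
--     """
--     workers_per_department = defaultdict(set)
--
--     for department, worker in data:
--         workers_per_department[department].add(worker)
--
--     return {
--         dept: sorted(workers)
--         for dept, workers in sorted(workers_per_department.items())
--     }
-- ===== SOURCE B (Python) =====
-- from typing import Dict, List, Tuple
--
--
-- def group_and_sort_workers_by_department(
--     data: List[Tuple[str, str]]
-- ) -> Dict[str, List[str]]:
--     """Sort the pairs once lexicographically, then build the result in one
--     linear pass: equal departments and equal workers are now adjacent, so
--     grouping needs no sets and no per-bucket sorting — duplicates are dropped
--     by comparing with the bucket's last element."""
--     result: Dict[str, List[str]] = {}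
--     for dept, worker in sorted(data):
--         lst = result.get(dept)
--         if lst is None:
--             result[dept] = [worker]
--         elif lst[-1] != worker:
--             lst.append(worker)
--     return result
-- ===== Notes on version B (the rewrite author's own statement) =====
-- stated objective: alternative
-- what changed: Replaces the defaultdict-of-sets plus per-bucket sorted() with a single lexicographic sort of the pairs followed by one linear pass that groups and deduplicates via a last-element comparison.
import Mathlib
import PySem

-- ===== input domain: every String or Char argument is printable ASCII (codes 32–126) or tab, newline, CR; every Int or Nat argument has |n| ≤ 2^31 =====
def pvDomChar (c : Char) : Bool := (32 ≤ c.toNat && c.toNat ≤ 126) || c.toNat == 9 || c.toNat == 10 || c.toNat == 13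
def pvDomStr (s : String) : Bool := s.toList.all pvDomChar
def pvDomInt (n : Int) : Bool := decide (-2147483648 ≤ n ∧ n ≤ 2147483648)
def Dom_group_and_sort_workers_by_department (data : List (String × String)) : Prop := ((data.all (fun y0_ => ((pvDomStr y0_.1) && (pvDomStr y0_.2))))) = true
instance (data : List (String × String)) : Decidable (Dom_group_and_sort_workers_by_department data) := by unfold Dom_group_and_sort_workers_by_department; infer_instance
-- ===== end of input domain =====

-- B replaces A's defaultdict-of-sets plus per-bucket sorted() with one lexicographic sort of the
-- pairs followed by a single deduplicating linear pass (objective: alternative decomposition).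

-- ===== PORT A =====
def group_and_sort_workers_by_department (data : List (String × String)) : List (String × List String) :=
  let workers_per_department : PySem.Dict String (PySem.Set String) :=
    data.foldl (fun d p => d.modify p.1 PySem.Set.empty (fun s => PySem.Set.add s p.2)) PySem.Dict.empty
  -- sorted(….items()) compares tuples, but dict keys are distinct, so only the first component is
  -- ever compared: sorting the items by their key is exact here
  (PySem.List.sorted workers_per_department.items (fun p => p.1)).map
    (fun p => (p.1, PySem.List.sorted p.2 (fun w => w)))

-- ===== PORT B =====
def group_and_sort_workers_by_department_alt (data : List (String × String)) : List (String × List String) :=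
  let step := fun (d : PySem.Dict String (List String)) (p : String × String) =>
    match d.get? p.1 with
    | none => d.insert p.1 [p.2]
    | some lst =>
        -- lst[-1] != worker ; the in-place append is modelled by inserting the extended list
        if PySem.List.pyGet? lst (-1) ≠ some p.2 then d.insert p.1 (lst ++ [p.2]) else d
  ((PySem.List.sorted2 data (fun p => p.1) (fun p => p.2)).foldl step PySem.Dict.empty).items

-- ===== PRECONDITION & SPEC =====
def Spec_group_and_sort_workers_by_department (data : List (String × String)) (out : List (String × List String)) : Prop := out = group_and_sort_workers_by_department_alt data
instance (data : List (String × String)) (out : List (String × List String)) : Decidable (Spec_group_and_sort_workers_by_department data out) := by unfold Spec_group_and_sort_workers_by_department; infer_instance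

-- ===== CLAIM (what is proved, stated in full; the proofs are below) =====
def Claim_equal_group_and_sort_workers_by_department : Prop := ∀ (data : List (String × String)), Dom_group_and_sort_workers_by_department data → Spec_group_and_sort_workers_by_department data (group_and_sort_workers_by_department data)

-- ===== LEMMAS AND PROOFS =====


theorem pv_sorted2_eq_sorted_lex (xs : List (String × String)) :
    PySem.List.sorted2 xs (fun p => p.1) (fun p => p.2)
      = PySem.List.sorted xs (fun p => (toLex p : Lex (String × String))) := by
  simp only [PySem.List.sorted2, PySem.List.sorted, if_neg (by decide : ¬ (false = true))]
  have h : (fun (a b : String × String) =>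
      (decide (a.1 < b.1) || (!decide (b.1 < a.1) && decide (a.2 < b.2))))
      = (fun (a b : String × String) => decide ((toLex a : Lex (String × String)) < toLex b)) := by
    funext a b
    have hl : ((toLex a : Lex (String × String)) < toLex b) ↔ (a.1 < b.1 ∨ (a.1 = b.1 ∧ a.2 < b.2)) :=
      Prod.Lex.lt_iff
    rcases lt_trichotomy a.1 b.1 with h1 | h1 | h1
    · simp [hl, h1]
    · simp [hl, h1]
    · simp [hl, h1, not_lt_of_gt h1, ne_of_gt h1]
  rw [h]


theorem pv_ofList_sublist {α : Type} [BEq α] [LawfulBEq α] (xs : List α) :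
    (PySem.Set.ofList xs).Sublist xs := by
  induction xs with
  | nil => simp [PySem.Set.ofList_nil]
  | cons x xs ih =>
    rw [PySem.Set.ofList_cons]
    exact (List.Sublist.trans (by simp [PySem.Set.discard]) ih).cons₂ x

theorem pv_mem_le_getLast? {α : Type} [LinearOrder α] (l : List α) (x m : α)
    (hp : l.Pairwise (· ≤ ·)) (hx : x ∈ l) (hm : l.getLast? = some m) : x ≤ m := by
  induction l with
  | nil => simp at hx
  | cons a t ih =>
    rw [List.pairwise_cons] at hp
    rcases t with _ | ⟨b, t'⟩
    · simp_all
    · rw [List.getLast?_cons_cons] at hm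
      have hmm : m ∈ b :: t' := by
        have := List.getLast?_eq_some_iff.mp hm
        rcases this with ⟨ys, hys⟩
        rw [hys]; simp
      rcases List.mem_cons.mp hx with h | h
      · exact h ▸ hp.1 m hmm
      · exact ih hp.2 h hm

theorem pv_dedup_foldl (ws acc : List String)
    (hws : ws.Pairwise (· ≤ ·)) (hacc : acc.Pairwise (· < ·))
    (hle : ∀ x ∈ acc, ∀ w ∈ ws, x ≤ w) :
    ws.foldl (fun v w => if v.getLast? ≠ some w then v ++ [w] else v) acc
      = PySem.Set.update acc ws := by
  induction ws generalizing acc with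
  | nil => simp [PySem.Set.update]
  | cons w ws ih =>
    rw [List.pairwise_cons] at hws
    rw [List.foldl_cons, PySem.Set.update_cons]
    have hcase : (if acc.getLast? ≠ some w then acc ++ [w] else acc) = PySem.Set.add acc w := by
      rw [PySem.Set.add_eq_ite]
      by_cases hmem : w ∈ acc
      · have hlast : acc.getLast? = some w := by
          rcases hlg : acc.getLast? with _ | m
          · rw [List.getLast?_eq_none_iff] at hlg
            simp [hlg] at hmem
          · have h1 : w ≤ m := pv_mem_le_getLast? acc w m (hacc.imp le_of_lt) hmem hlg
            have h2 : m ≤ w := hle m (List.mem_of_getLast? hlg) w (List.mem_cons_self)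
            rw [le_antisymm h1 h2]
        simp [hlast, hmem]
      · have hlast : acc.getLast? ≠ some w := fun h => hmem (List.mem_of_getLast? h)
        simp [hlast, hmem]
    rw [hcase]
    refine ih (PySem.Set.add acc w) hws.2 ?_ ?_
    · by_cases hmem : w ∈ acc
      · rw [PySem.Set.add_of_mem hmem]; exact hacc
      · rw [PySem.Set.add_of_not_mem hmem, List.pairwise_append]
        refine ⟨hacc, by simp, ?_⟩
        intro x hx y hy
        simp at hy; subst hy
        exact lt_of_le_of_ne (hle x hx _ (List.mem_cons_self)) (fun h => hmem (h ▸ hx))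
    · intro x hx v hv
      rcases (PySem.Set.mem_add acc w x).mp hx with h | h
      · exact hle x h v (List.mem_cons_of_mem _ hv)
      · exact h ▸ hws.1 v hv


theorem pv_A_getD (l : List (String × String)) (d : PySem.Dict String (PySem.Set String)) (k : String) :
    (l.foldl (fun d p => d.modify p.1 PySem.Set.empty (fun s => PySem.Set.add s p.2)) d).getD k []
      = PySem.Set.update (d.getD k []) ((l.filter (fun p => p.1 == k)).map (·.2)) := by
  induction l generalizing d with
  | nil => simp [PySem.Set.update]
  | cons p l ih =>
    rw [List.foldl_cons, ih]
    by_cases hk : p.1 = k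
    · simp [hk, PySem.Set.update_cons, PySem.Set.empty]
    · simp [hk, PySem.Dict.getD_modify, Ne.symm hk, PySem.Set.empty]

theorem pv_pyGet_neg_one (l : List String) : PySem.List.pyGet? l (-1) = l.getLast? := by
  rcases l with _ | ⟨a, t⟩
  · rfl
  · simp [PySem.List.pyGet?, PySem.List.pyIdx?, List.getLast?_eq_getElem?]

def pvBStep (d : PySem.Dict String (List String)) (p : String × String) : PySem.Dict String (List String) :=
  match d.get? p.1 with
  | none => d.insert p.1 [p.2]
  | some lst => if PySem.List.pyGet? lst (-1) ≠ some p.2 then d.insert p.1 (lst ++ [p.2]) else d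

theorem pv_B_keys (l : List (String × String)) (d : PySem.Dict String (List String)) :
    (l.foldl pvBStep d).keys = PySem.Set.update d.keys (l.map (·.1)) := by
  induction l generalizing d with
  | nil => simp [PySem.Set.update]
  | cons p l ih =>
    rw [List.foldl_cons, ih, List.map_cons, PySem.Set.update_cons]
    congr 1
    rcases hg : d.get? p.1 with _ | lst <;> simp only [pvBStep, hg]
    · have hc : d.contains p.1 = false := by
        rw [PySem.Dict.contains_eq_isSome_get?, hg]; rfl
      rw [PySem.Dict.keys_insert_of_not_contains _ _ hc,
        PySem.Set.add_of_not_mem (by simpa [← PySem.Dict.contains_iff_mem_keys] using hc)]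
    · have hc : d.contains p.1 = true := by
        rw [PySem.Dict.contains_eq_isSome_get?, hg]; rfl
      have hmem : p.1 ∈ d.keys := by rwa [← PySem.Dict.contains_iff_mem_keys]
      rw [PySem.Set.add_of_mem hmem]
      split
      · rw [PySem.Dict.keys_insert_of_contains _ _ hc]
      · rfl

theorem pv_B_getD (l : List (String × String)) (d : PySem.Dict String (List String)) (k : String) :
    (l.foldl pvBStep d).getD k []
      = ((l.filter (fun p => p.1 == k)).map (·.2)).foldl
          (fun v w => if v.getLast? ≠ some w then v ++ [w] else v) (d.getD k []) := by
  induction l generalizing d with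
  | nil => simp
  | cons p l ih =>
    rw [List.foldl_cons, ih, List.filter_cons]
    by_cases hk : p.1 = k
    · simp only [hk, beq_self_eq_true, if_pos, List.map_cons, List.foldl_cons]
      congr 1
      rcases hg : d.get? p.1 with _ | lst <;> simp only [pvBStep, hg]
      · have hdk : d.getD k [] = [] := by
          rw [← hk, PySem.Dict.getD_eq_get?_getD, hg]; rfl
        rw [hdk, hk]
        simp
      · have hdk : d.getD k [] = lst := by
          rw [← hk, PySem.Dict.getD_eq_get?_getD, hg]; rfl
        rw [hdk, pv_pyGet_neg_one]
        split
        · rw [PySem.Dict.getD_insert]; simp [hk]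
        · exact hdk
    · have hbk : (p.1 == k) = false := by simpa using hk
      simp only [hbk, Bool.false_eq_true, if_neg, not_false_iff]
      congr 1
      rcases hg : d.get? p.1 with _ | lst <;> simp only [pvBStep, hg]
      · rw [PySem.Dict.getD_insert]; simp [Ne.symm hk]
      · split
        · rw [PySem.Dict.getD_insert]; simp [Ne.symm hk]
        · rfl


-- ===== VERDICT (by name: the statement is the Claim_ definition above) =====
theorem group_and_sort_workers_by_department_spec : Claim_equal_group_and_sort_workers_by_department := by
  intro data _
  unfold Spec_group_and_sort_workers_by_department
  have e1 : group_and_sort_workers_by_department data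
      = (PySem.List.sorted ((data.foldl (fun d p => d.modify p.1 PySem.Set.empty (fun s => PySem.Set.add s p.2)) PySem.Dict.empty)).items (fun p => p.1)).map
          (fun p => (p.1, PySem.List.sorted p.2 (fun w => w))) := rfl
  have e2 : group_and_sort_workers_by_department_alt data
      = ((PySem.List.sorted2 data (fun p => p.1) (fun p => p.2)).foldl pvBStep PySem.Dict.empty).items := rfl
  rw [e1, e2, pv_sorted2_eq_sorted_lex]
  set sd := PySem.List.sorted data (fun p => (toLex p : Lex (String × String))) with hsd
  have hperm : sd.Perm data := PySem.List.sorted_perm _ _ _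
  have hplex : sd.Pairwise (fun p q => (toLex p : Lex (String × String)) ≤ toLex q) :=
    PySem.List.sorted_pairwise _ _
  -- derived orders
  have hfst : (sd.map (·.1)).Pairwise (· ≤ ·) := by
    rw [List.pairwise_map]
    refine hplex.imp ?_
    intro a b h
    rcases Prod.Lex.le_iff.mp h with h | ⟨h, _⟩
    · exact le_of_lt h
    · exact le_of_eq h
  have hlt : ∀ (xs : List String), xs.Pairwise (· ≤ ·) → (PySem.Set.ofList xs).Pairwise (· < ·) := by
    intro xs hxs
    have h1 := List.Pairwise.sublist (pv_ofList_sublist xs) hxs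
    have h2 : (PySem.Set.ofList xs).Pairwise (· ≠ ·) := PySem.Set.nodup_ofList xs
    exact (h1.and h2).imp (fun h => lt_of_le_of_ne h.1 h.2)
  -- B's dict
  have hBkeys : ((sd.foldl pvBStep PySem.Dict.empty)).keys = PySem.Set.ofList (sd.map (·.1)) := by
    rw [pv_B_keys]
    simp only [PySem.Dict.keys_empty, PySem.Set.update_nil_left]
  have hBnodup : ((sd.foldl pvBStep PySem.Dict.empty)).keys.Nodup := by
    rw [hBkeys]; exact PySem.Set.nodup_ofList _
  have hBitems : ((sd.foldl pvBStep PySem.Dict.empty)).items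
      = (PySem.Set.ofList (sd.map (·.1))).map
          (fun k => (k, (sd.foldl pvBStep PySem.Dict.empty).getD k [])) := by
    rw [← hBkeys]; exact PySem.Dict.items_eq_map_keys _ hBnodup []
  have hwsk : ∀ k : String, ((sd.filter (fun p => p.1 == k)).map (·.2)).Pairwise (· ≤ ·) := by
    intro k
    rw [List.pairwise_map]
    refine List.Pairwise.imp_of_mem ?_ (hplex.filter _)
    intro a b ha hb h
    have ha1 : a.1 = k := by simpa using (List.mem_filter.mp ha).2
    have hb1 : b.1 = k := by simpa using (List.mem_filter.mp hb).2
    rcases Prod.Lex.le_iff.mp h with h | ⟨_, h⟩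
    · exact absurd (ha1.trans hb1.symm) (ne_of_lt h)
    · exact h
  have hBgetD : ∀ k : String, (sd.foldl pvBStep PySem.Dict.empty).getD k []
      = PySem.Set.ofList ((sd.filter (fun p => p.1 == k)).map (·.2)) := by
    intro k
    rw [pv_B_getD]
    simp only [PySem.Dict.getD_empty]
    rw [pv_dedup_foldl _ _ (hwsk k) (by simp) (by simp), PySem.Set.update_nil_left]
  -- A's dict
  have hAkeys : ((data.foldl (fun d p => d.modify p.1 PySem.Set.empty (fun s => PySem.Set.add s p.2)) PySem.Dict.empty)).keys
      = PySem.Set.ofList (data.map (·.1)) := by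
    rw [PySem.Dict.keys_foldl_modify_key data (·.1) PySem.Set.empty (fun d p => fun s => PySem.Set.add s p.2)]
    simp only [PySem.Dict.keys_empty, PySem.Set.update_nil_left]
  have hAnodup : ((data.foldl (fun d p => d.modify p.1 PySem.Set.empty (fun s => PySem.Set.add s p.2)) PySem.Dict.empty)).keys.Nodup := by
    rw [hAkeys]; exact PySem.Set.nodup_ofList _
  have hAitems : ((data.foldl (fun d p => d.modify p.1 PySem.Set.empty (fun s => PySem.Set.add s p.2)) PySem.Dict.empty)).items
      = (PySem.Set.ofList (data.map (·.1))).map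
          (fun k => (k, PySem.Set.ofList ((data.filter (fun p => p.1 == k)).map (·.2)))) := by
    rw [← hAkeys, PySem.Dict.items_eq_map_keys _ hAnodup []]
    refine List.map_congr_left ?_
    intro k _
    rw [pv_A_getD]
    simp only [PySem.Dict.getD_empty, PySem.Set.update_nil_left]
  rw [hAitems, hBitems]
  -- key lists agree as sets
  have hksperm : (PySem.Set.ofList (sd.map (·.1))).Perm (PySem.Set.ofList (data.map (·.1))) := by
    rw [List.perm_ext_iff_of_nodup (PySem.Set.nodup_ofList _) (PySem.Set.nodup_ofList _)]
    intro a
    simp only [PySem.Set.mem_ofList, List.mem_map]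
    exact ⟨fun ⟨p, hp, h⟩ => ⟨p, hperm.mem_iff.mp hp, h⟩, fun ⟨p, hp, h⟩ => ⟨p, hperm.mem_iff.mpr hp, h⟩⟩
  have hkslt : (PySem.Set.ofList (sd.map (·.1))).Pairwise (· < ·) := hlt _ hfst
  -- step 1: the outer sort
  have houter : PySem.List.sorted
      ((PySem.Set.ofList (data.map (·.1))).map (fun k => (k, PySem.Set.ofList ((data.filter (fun p => p.1 == k)).map (·.2)))))
      (fun p => p.1)
      = (PySem.Set.ofList (sd.map (·.1))).map (fun k => (k, PySem.Set.ofList ((data.filter (fun p => p.1 == k)).map (·.2)))) := by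
    refine PySem.List.sorted_eq_of_perm_of_pairwise_lt _ _ _ (hksperm.map _) ?_
    rw [List.pairwise_map]
    exact hkslt
  rw [houter, List.map_map]
  -- step 2: per-key values
  refine List.map_congr_left ?_
  intro k _
  simp only [Function.comp]
  congr 1
  rw [hBgetD k]
  refine PySem.List.sorted_eq_of_perm_of_pairwise_lt _ _ _ ?_ ?_
  · rw [List.perm_ext_iff_of_nodup (PySem.Set.nodup_ofList _) (PySem.Set.nodup_ofList _)]
    intro x
    simp only [PySem.Set.mem_ofList, List.mem_map, List.mem_filter]
    exact ⟨fun ⟨p, ⟨hp, hk⟩, h⟩ => ⟨p, ⟨hperm.mem_iff.mp hp, hk⟩, h⟩,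
           fun ⟨p, ⟨hp, hk⟩, h⟩ => ⟨p, ⟨hperm.mem_iff.mpr hp, hk⟩, h⟩⟩
  · exact hlt _ (hwsk k)
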